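-- pv_equiv track=rewrite | github.com/JerryAllMighty/AlgorithmAndDataStructures | Programmers/과일 장수.py | solution
-- ===== SOURCE A (Python) =====
-- def solution(k, m, score):
--     answer = 0
--     score.sort(reverse=True)
--     limitIdx = (len(score)//m) * m
--     cnt = 0
--     tempList = []
--     for i in score[:limitIdx]:
--         cnt += 1
--         tempList.append(i)
--         if cnt == m:
--             cnt = 0
--             answer += min(tempList) * m
--             tempList = []
--
--     return answer
-- ===== SOURCE B (Python) =====
-- def solution(k, m, score):
--     # Sort a copy descending; each group's minimum is simply the element at
--     # index m-1, 2m-1, ... so the grouping loop collapses to a strided sum.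
--     s = sorted(score, reverse=True)
--     total = 0
--     for i in range(m - 1, len(s), m):
--         total += s[i]
--     return m * total
-- ===== Notes on version B (the rewrite author's own statement) =====
-- stated objective: simpler
-- what changed: The grouping loop with a running counter, a temp list and a min() scan per group is replaced by a closed-form strided sum: after the descending sort, each group's minimum is the element at index m-1, 2m-1, ..., so B sums every m-th element directly and multiplies by m once.
import Mathlib
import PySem

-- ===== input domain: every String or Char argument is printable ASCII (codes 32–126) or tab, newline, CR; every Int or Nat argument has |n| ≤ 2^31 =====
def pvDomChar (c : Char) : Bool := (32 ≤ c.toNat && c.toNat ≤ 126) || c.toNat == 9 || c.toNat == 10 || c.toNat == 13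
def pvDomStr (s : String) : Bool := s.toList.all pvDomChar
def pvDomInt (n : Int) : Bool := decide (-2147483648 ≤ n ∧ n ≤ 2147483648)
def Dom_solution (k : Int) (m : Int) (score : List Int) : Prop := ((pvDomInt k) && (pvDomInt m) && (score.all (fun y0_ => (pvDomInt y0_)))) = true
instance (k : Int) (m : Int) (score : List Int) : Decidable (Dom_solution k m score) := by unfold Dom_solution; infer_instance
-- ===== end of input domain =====

-- B replaces A's counter/tempList/min() grouping loop by a strided sum over indices m-1, 2m-1, …
-- of the descending-sorted list (simpler; same O(n log n) cost). A sorts `score` in place; the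
-- equivalence proved here is about the RETURN value only (B sorts a copy).

-- ===== PORT A =====
-- loop body of A's for-loop: state = (answer, cnt, tempList)
def aStep (m : Int) (st : Int × Int × List Int) (i : Int) : Int × Int × List Int :=
  let cnt := st.2.1 + 1
  let temp := st.2.2 ++ [i]
  if cnt = m then (st.1 + (PySem.List.min? temp (fun x => x)).getD 0 * m, 0, ([] : List Int))
  else (st.1, cnt, temp)

def solution (k : Int) (m : Int) (score : List Int) : Int :=
  let s := PySem.List.sorted score (fun x => x) true
  let limitIdx := PySem.Int.floordiv (s.length : Int) m * m
  ((PySem.List.slice s none (some limitIdx)).foldl (aStep m) (0, 0, ([] : List Int))).1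

-- ===== PORT B =====
def solution_alt (k : Int) (m : Int) (score : List Int) : Int :=
  let s := PySem.List.sorted score (fun x => x) true
  m * ((PySem.List.pyRange (m - 1) (s.length : Int) m).foldl
        (fun acc i => acc + PySem.List.pyGetD s i 0) 0)

-- ===== PRECONDITION & SPEC =====
-- A raises ZeroDivisionError when m = 0 (len(score)//m); Pre_ excludes exactly that.
def Pre_solution (k : Int) (m : Int) (score : List Int) : Prop := m ≠ 0
instance (k : Int) (m : Int) (score : List Int) : Decidable (Pre_solution k m score) := by unfold Pre_solution; infer_instance
def pvWitness_solution : Int × Int × List Int := (4, 3, [4, 1, 3, 2, 2, 1])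

def Spec_solution (k : Int) (m : Int) (score : List Int) (out : Int) : Prop := out = solution_alt k m score
instance (k : Int) (m : Int) (score : List Int) (out : Int) : Decidable (Spec_solution k m score out) := by unfold Spec_solution; infer_instance

-- ===== CLAIM (what is proved, stated in full; the proofs are below) =====
def Claim_equal_solution : Prop := ∀ (k : Int) (m : Int) (score : List Int), Dom_solution k m score → Pre_solution k m score → Spec_solution k m score (solution k m score)

-- ===== LEMMAS AND PROOFS =====

-- the answer accumulator of A's loop is additive
lemma aStep_shift (m : Int) (l : List Int) : ∀ (ans cnt : Int) (temp : List Int),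
    l.foldl (aStep m) (ans, cnt, temp)
      = (ans + (l.foldl (aStep m) (0, cnt, temp)).1, (l.foldl (aStep m) (0, cnt, temp)).2) := by
  induction l with
  | nil => intro ans cnt temp; simp
  | cons x t ih =>
      intro ans cnt temp
      simp only [List.foldl_cons, aStep]
      by_cases h : cnt + 1 = m
      · simp only [if_pos h]
        rw [ih (ans + _), ih ((0:Int) + _)]
        simp [add_assoc]
      · simp only [if_neg h]
        exact ih ans (cnt + 1) (temp ++ [x])

-- with a negative m the `cnt == m` branch never fires: the answer stays put
lemma aStep_neg (m : Int) (hm : m < 0) (l : List Int) : ∀ (ans cnt : Int) (temp : List Int),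
    0 ≤ cnt → (l.foldl (aStep m) (ans, cnt, temp)).1 = ans := by
  induction l with
  | nil => intro ans cnt temp _; rfl
  | cons x t ih =>
      intro ans cnt temp hc
      simp only [List.foldl_cons, aStep]
      rw [if_neg (by omega)]
      exact ih ans (cnt + 1) (temp ++ [x]) (by omega)

-- a full chunk of length m empties the temp list and adds min(chunk) * m
lemma aStep_chunk (m : Int) : ∀ (c : List Int), c ≠ [] → ∀ (ans cnt : Int) (temp : List Int),
    0 ≤ cnt → cnt + (c.length : Int) = m →
    c.foldl (aStep m) (ans, cnt, temp)
      = (ans + (PySem.List.min? (temp ++ c) (fun x => x)).getD 0 * m, 0, ([] : List Int)) := by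
  intro c
  induction c with
  | nil => intro h; exact absurd rfl h
  | cons x t ih =>
      intro _ ans cnt temp hc hm
      simp only [List.foldl_cons, aStep]
      rcases List.eq_nil_or_concat' t with rfl | ⟨u, y, rfl⟩
      · have hx : cnt + 1 = m := by simpa using hm
        rw [if_pos hx]
        simp
      · have hne : (u ++ [y]) ≠ ([] : List Int) := by simp
        have hlt : cnt + 1 ≠ m := by
          have := hm; simp only [List.length_cons, List.length_append, List.length_cons,
            List.length_nil] at this
          omega
        rw [if_neg hlt]
        rw [ih hne ans (cnt + 1) (temp ++ [x]) (by omega)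
            (by simp only [List.length_append, List.length_cons, List.length_nil] at hm ⊢; push_cast at hm ⊢; omega)]
        simp [List.append_assoc]

-- in a descending-sorted list the last element is a lower bound
lemma getLast_le_of_pairwise : ∀ (c : List Int) (hne : c ≠ []),
    c.Pairwise (fun a b => b ≤ a) → ∀ x ∈ c, c.getLast hne ≤ x := by
  intro c
  induction c with
  | nil => intro h; exact absurd rfl h
  | cons a t ih =>
      intro _ hp x hx
      rcases List.pairwise_cons.mp hp with ⟨ha, hpt⟩
      rcases t.eq_nil_or_concat' with rfl | ⟨u, y, rfl⟩
      · simp at hx; simp [hx]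
      · have hne' : (u ++ [y]) ≠ ([] : List Int) := by simp
        rw [List.getLast_cons hne']
        rcases List.mem_cons.mp hx with rfl | hx'
        · have : (u ++ [y]).getLast hne' ∈ u ++ [y] := List.getLast_mem hne'
          exact le_trans (ih hne' hpt _ this) (le_of_eq rfl) |>.trans (ha _ this) |>.trans (le_refl x) |>.trans (le_refl x)
        · exact ih hne' hpt x hx'

-- min() of a nonempty descending-sorted list is its last element
lemma min?_getD_eq_getLast (c : List Int) (hne : c ≠ []) (hp : c.Pairwise (fun a b => b ≤ a)) :
    (PySem.List.min? c (fun x => x)).getD 0 = c.getLast hne := by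
  cases h : PySem.List.min? c (fun x => x) with
  | none => exact absurd ((PySem.List.min?_eq_none_iff c _).mp h) hne
  | some v =>
      have hv : v ∈ c := PySem.List.min?_mem h
      have hmin : ∀ y ∈ c, v ≤ y := PySem.List.min?_isMin h
      have h1 : v ≤ c.getLast hne := hmin _ (List.getLast_mem hne)
      have h2 : c.getLast hne ≤ v := getLast_le_of_pairwise c hne hp v hv
      simp [le_antisymm h1 h2]

-- range(m-1, n, m) is empty below one full group
lemma pyRange_stride_nil (m n : Int) (hm : 0 < m) (h : n < m) :
    PySem.List.pyRange (m - 1) n m = [] := by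
  rw [PySem.List.pyRange_of_pos _ _ hm, if_neg (by omega)]
  simp

-- range(m-1, n, m) peels its first index when n ≥ m
lemma pyRange_stride_cons (m n : Int) (hm : 0 < m) (h : m ≤ n) :
    PySem.List.pyRange (m - 1) n m
      = (m - 1) :: (PySem.List.pyRange (m - 1) (n - m) m).map (· + m) := by
  rw [PySem.List.pyRange_of_pos _ _ hm, PySem.List.pyRange_of_pos _ _ hm]
  have hN : (n - (m - 1) + m - 1) / m = (n - m - (m - 1) + m - 1) / m + 1 := by
    have : n - (m - 1) + m - 1 = (n - m - (m - 1) + m - 1) + 1 * m := by ring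
    rw [this, Int.add_mul_ediv_right _ _ (by omega)]
  have hpos : 0 < (n - (m - 1) + m - 1) / m := by
    have h1 : 1 * m ≤ n - (m - 1) + m - 1 := by omega
    have := Int.le_ediv_iff_mul_le (a := 1) (b := n - (m - 1) + m - 1) (c := m) (by omega)
    omega
  rw [if_pos (by omega)]
  by_cases h2 : m - 1 < n - m
  · rw [if_pos h2]
    have : ((n - (m - 1) + m - 1) / m).toNat = ((n - m - (m - 1) + m - 1) / m).toNat + 1 := by
      have hnn : 0 ≤ (n - m - (m - 1) + m - 1) / m :=
        Int.ediv_nonneg (by omega) (by omega)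
      omega
    rw [this, List.range_succ_eq_map]
    simp only [List.map_cons, List.map_map]
    refine List.cons_eq_cons.mpr ⟨by push_cast; ring, ?_⟩
    apply List.map_congr_left
    intro a _
    simp only [Function.comp_apply, Nat.succ_eq_add_one]
    push_cast
    ring
  · rw [if_neg h2]
    have hone : (n - (m - 1) + m - 1) / m = 1 := by
      have hnn : 0 ≤ (n - m - (m - 1) + m - 1) / m :=
        Int.ediv_nonneg (by omega) (by omega)
      have hub : (n - m - (m - 1) + m - 1) / m ≤ 0 := by
        by_contra hc
        have h1 := Int.le_ediv_iff_mul_le (a := 1) (b := n - m - (m - 1) + m - 1) (c := m) (by omega)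
        omega
      omega
    rw [hone]
    simp

-- the heart of the file: on a descending-sorted list, A's grouping loop equals B's strided sum
lemma core (m : Int) (hm : 0 < m) : ∀ (N : Nat) (s : List Int), s.length ≤ N →
    s.Pairwise (fun a b => b ≤ a) →
    ((PySem.List.slice s none (some (PySem.Int.floordiv (s.length : Int) m * m))).foldl
        (aStep m) (0, 0, ([] : List Int))).1
      = m * ((PySem.List.pyRange (m - 1) (s.length : Int) m).map
          (fun i => PySem.List.pyGetD s i 0)).sum := by
  intro N
  induction N with
  | zero =>
      intro s hlen hp
      have hnil : s = [] := List.eq_nil_of_length_eq_zero (by omega)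
      subst hnil
      simp only [List.length_nil, Nat.cast_zero]
      rw [pyRange_stride_nil m 0 hm hm]
      simp [PySem.Int.floordiv_eq_ediv_of_pos hm, PySem.List.slice_to]
  | succ N ih =>
      intro s hlen hp
      by_cases hsm : (s.length : Int) < m
      · have h0 : PySem.Int.floordiv (s.length : Int) m = 0 := by
          rw [PySem.Int.floordiv_eq_ediv_of_pos hm]
          exact Int.ediv_eq_zero_of_lt (by positivity) hsm
        rw [h0, zero_mul, PySem.List.slice_to s le_rfl,
          pyRange_stride_nil m _ hm hsm]
        simp
      · have hmn : m ≤ (s.length : Int) := le_of_not_gt hsm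
        have hms : m.toNat ≤ s.length := by omega
        have hclen : (s.take m.toNat).length = m.toNat := List.length_take_of_le hms
        have hcne : s.take m.toNat ≠ [] := by
          intro h; rw [h] at hclen; simp at hclen; omega
        have htlenZ : ((s.drop m.toNat).length : Int) = (s.length : Int) - m := by
          rw [List.length_drop]; omega
        -- split the quota: s.length // m * m = m + (len t) // m * m
        have hq : PySem.Int.floordiv (s.length : Int) m * m
            = m + PySem.Int.floordiv ((s.drop m.toNat).length : Int) m * m := by
          rw [PySem.Int.floordiv_eq_ediv_of_pos hm, PySem.Int.floordiv_eq_ediv_of_pos hm,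
            htlenZ]
          have e : (s.length : Int) = ((s.length : Int) - m) + 1 * m := by ring
          conv_lhs => rw [e, Int.add_mul_ediv_right _ _ (by omega)]
          ring
        have hL0 : 0 ≤ PySem.Int.floordiv ((s.drop m.toNat).length : Int) m * m := by
          rw [PySem.Int.floordiv_eq_ediv_of_pos hm]
          exact mul_nonneg (Int.ediv_nonneg (by positivity) (by omega)) (by omega)
        have hLle : PySem.Int.floordiv ((s.drop m.toNat).length : Int) m * m
            ≤ ((s.drop m.toNat).length : Int) := by
          rw [PySem.Int.floordiv_eq_ediv_of_pos hm]
          exact Int.ediv_mul_le _ (by omega)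
        rw [hq, PySem.List.slice_to s (by omega)]
        have htake : ∀ (L : Int), 0 ≤ L → L ≤ ((s.drop m.toNat).length : Int) →
            s.take ((m + L).toNat)
              = s.take m.toNat ++ (s.drop m.toNat).take L.toNat := by
          intro L hL0' hLle'
          conv_lhs => rw [← List.take_append_drop m.toNat s]
          rw [List.take_append, hclen]
          congr 1
          · exact List.take_of_length_le (by omega)
          · congr 1
            omega
        rw [htake _ hL0 hLle, List.foldl_append,
          aStep_chunk m _ hcne 0 0 [] le_rfl (by rw [hclen]; omega)]
        simp only [List.nil_append, zero_add]
        have hcp : (s.take m.toNat).Pairwise (fun a b => b ≤ a) :=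
          List.Pairwise.sublist (List.take_sublist _ _) hp
        rw [min?_getD_eq_getLast _ hcne hcp, aStep_shift,
          ← PySem.List.slice_to (s.drop m.toNat) hL0,
          ih (s.drop m.toNat) (by rw [List.length_drop]; omega)
            (List.Pairwise.sublist (List.drop_sublist _ _) hp),
          htlenZ, pyRange_stride_cons m _ hm hmn]
        simp only [List.map_cons, List.sum_cons, List.map_map]
        -- head: s[m-1] is the last element of the first chunk
        have hhead : PySem.List.pyGetD s (m - 1) 0 = (s.take m.toNat).getLast hcne := by
          rw [PySem.List.pyGetD_eq_getElem s 0 (by omega) (by omega),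
            List.getLast_eq_getElem, List.getElem_take]
          simp only [hclen, show (m - 1).toNat = m.toNat - 1 from by omega]
        -- tail: shifted indices into s read the dropped suffix
        have htail : ((PySem.List.pyRange (m - 1) ((s.length : Int) - m) m).map
              ((fun i => PySem.List.pyGetD s i 0) ∘ (· + m))).sum
            = ((PySem.List.pyRange (m - 1) ((s.length : Int) - m) m).map
              (fun i => PySem.List.pyGetD (s.drop m.toNat) i 0)).sum := by
          congr 1
          apply List.map_congr_left
          intro i hi
          rcases (PySem.List.mem_pyRange_iff_of_pos hm i).mp hi with ⟨hi1, hi2, -⟩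
          simp only [Function.comp_apply]
          rw [PySem.List.pyGetD_eq_getElem s 0 (by omega) (by omega),
            PySem.List.pyGetD_eq_getElem (s.drop m.toNat) 0 (by omega)
              (by rw [htlenZ]; omega),
            List.getElem_drop]
          simp only [show (i + m).toNat = m.toNat + i.toNat from by omega]
        rw [hhead] at *
        rw [hhead] at *
        rw [htail]
        ring

-- the two ports agree on any list once it is descending-sorted
lemma bridge (m : Int) (s : List Int) (hp : s.Pairwise (fun a b => b ≤ a)) (hm : m ≠ 0) :
    ((PySem.List.slice s none (some (PySem.Int.floordiv (s.length : Int) m * m))).foldl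
        (aStep m) (0, 0, ([] : List Int))).1
      = m * ((PySem.List.pyRange (m - 1) (s.length : Int) m).foldl
          (fun acc i => acc + PySem.List.pyGetD s i 0) 0) := by
  rcases lt_trichotomy m 0 with hneg | hz | hpos
  · rw [aStep_neg m hneg _ 0 0 [] le_rfl]
    have he : PySem.List.pyRange (m - 1) (s.length : Int) m = [] := by
      simp only [PySem.List.pyRange]
      rw [if_neg hm, if_neg (by omega), if_neg (by omega)]
      simp
    rw [he]
    simp
  · exact absurd hz hm
  · rw [core m hpos s.length s le_rfl hp, PySem.List.foldl_add]
    simp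

-- ===== VERDICT (by name: the statement is the Claim_ definition above) =====
theorem solution_spec : Claim_equal_solution := by
  intro k m score _ hpre
  unfold Spec_solution
  exact bridge m (PySem.List.sorted score (fun x => x) true)
    (PySem.List.sorted_pairwise_rev score (fun x => x)) hpre
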